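-- pv_equiv track=rewrite | github.com/pypi-data/pypi-mirror-353 | packages/i2net/i2net-2.0.1.tar.gz/i2net-2.0.1/src/I2NeT/decoder.py | _calculate_expected_float_count
-- ===== SOURCE A (Python) =====
-- from typing import List, Dict, Any, Optional, Tuple
--
-- def _calculate_expected_float_count(original_types: List[str]) -> int:
--     """
--     Calculate expected number of floats based on data types.
--
--     Args:
--         original_types: List of original data types
--
--     Returns:
--         Expected number of float values
--     """
--     float_count = 0
--     for data_type in original_types:
--         if data_type == "IP Address":
--             float_count += 4  # 4 octets
--         elif data_type == "MAC Address":
--             float_count += 2  # 2 chunks of 3 bytes each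
--         else:  # Integer, Float, String
--             float_count += 1
--     return float_count
-- ===== SOURCE B (Python) =====
-- def _calculate_expected_float_count(original_types):
--     ip = original_types.count("IP Address")
--     mac = original_types.count("MAC Address")
--     return len(original_types) + 3 * ip + mac
-- ===== Notes on version B (the rewrite author's own statement) =====
-- stated objective: simpler
-- what changed: Replaced the per-element if/elif accumulation loop with a tally-then-formula: count the two special types once and return n + 3*ip + mac.
import Mathlib
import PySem

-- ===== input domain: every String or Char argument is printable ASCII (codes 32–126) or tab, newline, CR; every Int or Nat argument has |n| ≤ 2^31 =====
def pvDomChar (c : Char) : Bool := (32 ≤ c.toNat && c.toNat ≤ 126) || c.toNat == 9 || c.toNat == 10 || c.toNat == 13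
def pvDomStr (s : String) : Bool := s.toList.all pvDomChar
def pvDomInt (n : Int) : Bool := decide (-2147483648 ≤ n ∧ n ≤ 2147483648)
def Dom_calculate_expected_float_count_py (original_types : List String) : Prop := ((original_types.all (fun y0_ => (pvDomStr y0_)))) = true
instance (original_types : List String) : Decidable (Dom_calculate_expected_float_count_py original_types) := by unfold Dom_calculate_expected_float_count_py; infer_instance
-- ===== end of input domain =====

-- ===== PORT A =====
-- B replaces the per-element branch loop with a tally of the two special types and a closed formula (simpler).
def calculate_expected_float_count_py (original_types : List String) : Int :=
  original_types.foldl
    (fun float_count data_type =>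
      if data_type == "IP Address" then float_count + 4
      else if data_type == "MAC Address" then float_count + 2
      else float_count + 1) 0

-- ===== PORT B =====
def calculate_expected_float_count_py_alt (original_types : List String) : Int :=
  let ip : Int := PySem.List.count original_types "IP Address"
  let mac : Int := PySem.List.count original_types "MAC Address"
  (original_types.length : Int) + 3 * ip + mac

-- ===== PRECONDITION & SPEC =====
def Spec_calculate_expected_float_count_py (original_types : List String) (out : Int) : Prop := out = calculate_expected_float_count_py_alt original_types
instance (original_types : List String) (out : Int) : Decidable (Spec_calculate_expected_float_count_py original_types out) := by unfold Spec_calculate_expected_float_count_py; infer_instance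

-- ===== CLAIM (what is proved, stated in full; the proofs are below) =====
def Claim_equal_calculate_expected_float_count_py : Prop := ∀ (original_types : List String), Dom_calculate_expected_float_count_py original_types → Spec_calculate_expected_float_count_py original_types (calculate_expected_float_count_py original_types)

-- ===== LEMMAS AND PROOFS =====

-- ===== VERDICT (by name: the statement is the Claim_ definition above) =====
lemma pv_foldl_closed (xs : List String) (a : Int) :
    xs.foldl
      (fun float_count data_type =>
        if data_type == "IP Address" then float_count + 4
        else if data_type == "MAC Address" then float_count + 2
        else float_count + 1) a
    = a + xs.length + 3 * (xs.count "IP Address" : Int) + (xs.count "MAC Address" : Int) := by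
  induction xs generalizing a with
  | nil => simp
  | cons x xs ih =>
    simp only [List.foldl_cons, ih, List.count_cons, List.length_cons]
    by_cases h1 : x = "IP Address"
    · subst h1; simp; ring
    · by_cases h2 : x = "MAC Address"
      · subst h2; simp; ring
      · simp [h1, h2, beq_iff_eq]; ring

theorem calculate_expected_float_count_py_spec : Claim_equal_calculate_expected_float_count_py := by
  intro xs _
  unfold Spec_calculate_expected_float_count_py calculate_expected_float_count_py calculate_expected_float_count_py_alt
  rw [pv_foldl_closed]
  simp [PySem.List.count]
  try ring
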